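-- pv_equiv track=rewrite | github.com/shivam5750/Adventofcode2020 | day6/day6.py | everyoneAnswered
-- ===== SOURCE A (Python) =====
-- def everyoneAnswered(map2):
-- 	ans=0
-- 	group_of_person ={}
-- 	for ques in map2:
-- 		if len(ques) == 1:
-- 			ans +=len(ques[0])
--
--
-- 		else:
-- 			group_of_person ={}
--
-- 			for person in ques:
-- 			 	for answer in person:
--
-- 			 		if answer in group_of_person:
-- 			 			group_of_person[answer] +=1
-- 			 		else:
-- 			 			group_of_person[answer] = 1
-- 			for item in group_of_person.items():
-- 			 	if item[1] == len(ques):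
-- 			 		ans +=1
-- 	return ans
-- ===== SOURCE B (Python) =====
-- def everyoneAnswered(map2):
--     total = 0
--     for ques in map2:
--         n = len(ques)
--         if n == 1:
--             total += len(ques[0])
--         else:
--             chars = sorted(''.join(ques))
--             while chars:
--                 c = chars[0]
--                 run = 1
--                 while run < len(chars) and chars[run] == c:
--                     run += 1
--                 if run == n:
--                     total += 1
--                 chars = chars[run:]
--     return total
-- ===== Notes on version B (the rewrite author's own statement) =====
-- stated objective: alternative
-- what changed: Per multi-person group, B replaces A's hash-counter dict (count every character, then scan the dict items) by sorting the concatenated answer string and scanning it once, counting equal-character runs whose length equals the group size; the single-person branch is kept.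
import Mathlib
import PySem

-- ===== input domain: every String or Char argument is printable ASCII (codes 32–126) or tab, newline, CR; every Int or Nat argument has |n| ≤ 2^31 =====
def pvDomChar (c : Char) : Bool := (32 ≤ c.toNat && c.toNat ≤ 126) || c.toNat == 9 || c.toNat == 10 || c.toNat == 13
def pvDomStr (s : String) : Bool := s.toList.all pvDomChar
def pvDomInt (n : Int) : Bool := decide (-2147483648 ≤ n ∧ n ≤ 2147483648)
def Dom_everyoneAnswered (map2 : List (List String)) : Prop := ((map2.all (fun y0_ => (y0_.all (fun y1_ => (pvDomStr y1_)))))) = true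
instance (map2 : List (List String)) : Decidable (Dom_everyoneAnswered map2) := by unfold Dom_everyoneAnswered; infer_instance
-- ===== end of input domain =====

-- B replaces A's per-group hash-counter dict with a sort-then-scan over the concatenated
-- group, counting equal runs whose length equals the group size (objective: alternative).

-- ===== PORT A =====
def everyoneAnswered (map2 : List (List String)) : Int :=
  map2.foldl (fun ans ques =>
    if ques.length == 1 then
      ans + ((ques.headD "").toList.length : Int)   -- ques[0]: headD is exact, length == 1
    else
      let d : PySem.Dict Char Int := ques.foldl (fun d person =>
        person.toList.foldl (fun d answer =>
          if PySem.Dict.contains d answer then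
            PySem.Dict.insert d answer (PySem.Dict.getD d answer 0 + 1)
          else
            PySem.Dict.insert d answer 1) d) PySem.Dict.empty
      (PySem.Dict.items d).foldl (fun ans item =>
        if item.2 == (ques.length : Int) then ans + 1 else ans) ans) 0

-- ===== PORT B =====
-- the inner pair of while loops of Source B: `run` is 1 + the number of immediately
-- following copies of chars[0], and `chars = chars[run:]` drops exactly that run
def runScan (n : Int) : List Char → Int
  | [] => 0
  | c :: rest =>
      let run : Nat := 1 + (rest.takeWhile (fun x => x == c)).length
      (if (run : Int) == n then 1 else 0) + runScan n (rest.dropWhile (fun x => x == c))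
  termination_by l => l.length
  decreasing_by
    have := List.length_dropWhile_le (fun x => x == c) rest
    simp; omega

def everyoneAnswered_alt (map2 : List (List String)) : Int :=
  map2.foldl (fun total ques =>
    if ques.length == 1 then
      total + ((ques.headD "").toList.length : Int)   -- ques[0]: headD is exact, length == 1
    else
      -- sorted(''.join(ques)): the characters of the concatenation, in ascending order
      let chars := PySem.List.sorted ((ques.map String.toList).flatten) (fun x => x) false
      total + runScan (ques.length : Int) chars) 0

-- ===== PRECONDITION & SPEC =====
def Spec_everyoneAnswered (map2 : List (List String)) (out : Int) : Prop := out = everyoneAnswered_alt map2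
instance (map2 : List (List String)) (out : Int) : Decidable (Spec_everyoneAnswered map2 out) := by unfold Spec_everyoneAnswered; infer_instance

-- ===== CLAIM (what is proved, stated in full; the proofs are below) =====
def Claim_equal_everyoneAnswered : Prop := ∀ (map2 : List (List String)), Dom_everyoneAnswered map2 → Spec_everyoneAnswered map2 (everyoneAnswered map2)

-- ===== LEMMAS AND PROOFS =====

-- the number of distinct characters of l whose total count in l is n
def distinctWithCount (l : List Char) (n : Int) : Nat :=
  (PySem.List.dedup l).countP (fun c => ((l.count c : Int) == n))

theorem count_loop_eq (l : List (Char × Int)) (n ans : Int) :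
    l.foldl (fun a it => if it.2 == n then a + 1 else a) ans
      = ans + (l.countP (fun it => it.2 == n) : Int) :=
  PySem.List.foldl_if_add_one _ l ans

theorem aDict_eq_counter (ques : List String) :
    ques.foldl (fun d person =>
        person.toList.foldl (fun d answer =>
          if PySem.Dict.contains d answer then
            PySem.Dict.insert d answer (PySem.Dict.getD d answer 0 + 1)
          else
            PySem.Dict.insert d answer 1) d) PySem.Dict.empty
      = PySem.Dict.counter ((ques.map String.toList).flatten) := by
  have hstep : ∀ (d : PySem.Dict Char Int) (a : Char),
      (if PySem.Dict.contains d a then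
        PySem.Dict.insert d a (PySem.Dict.getD d a 0 + 1)
      else PySem.Dict.insert d a 1) = PySem.Dict.insert d a (PySem.Dict.getD d a 0 + 1) := by
    intro d a
    by_cases h : PySem.Dict.contains d a
    · simp [h]
    · have h0 : PySem.Dict.getD d a 0 = 0 := by
        simp only [PySem.Dict.getD]
        rw [PySem.Dict.contains_eq_isSome_get?] at h
        cases hg : d.get? a <;> simp [hg] at h ⊢
      simp [h, h0]
  simp only [hstep]
  rw [← PySem.Dict.foldl_insert_getD_add_one_eq_counter, List.foldl_flatten, List.foldl_map]

theorem update_append (r : List Char) (a s : List Char) (h : ∀ y ∈ r, y ∉ a) :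
    r.foldl PySem.Set.add (a ++ s) = a ++ r.foldl PySem.Set.add s := by
  induction r generalizing s with
  | nil => rfl
  | cons y r' ih =>
    have hy : y ∉ a := h y (by simp)
    have hadd : PySem.Set.add (a ++ s) y = a ++ PySem.Set.add s y := by
      by_cases hs : y ∈ s
      · simp [PySem.Set.add, PySem.Set.contains, hs, hy]
      · simp [PySem.Set.add, PySem.Set.contains, hs, hy]
    rw [List.foldl_cons, hadd, ih _ (fun z hz => h z (by simp [hz])), List.foldl_cons]

theorem ofList_all_eq (t : List Char) (c : Char) (ht : ∀ x ∈ t, x = c) :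
    t.foldl PySem.Set.add [c] = [c] := by
  induction t with
  | nil => rfl
  | cons x t' ih =>
    have hx : x = c := ht x (by simp)
    rw [List.foldl_cons]
    have : PySem.Set.add [c] x = [c] := by simp [PySem.Set.add, PySem.Set.contains, hx]
    rw [this, ih (fun z hz => ht z (by simp [hz]))]

theorem dedup_run (t r : List Char) (c : Char) (ht : ∀ x ∈ t, x = c) (hr : c ∉ r) :
    PySem.List.dedup (c :: (t ++ r)) = c :: PySem.List.dedup r := by
  rw [PySem.List.dedup_eq_ofList, PySem.List.dedup_eq_ofList,
      PySem.Set.ofList_eq_foldl, PySem.Set.ofList_eq_foldl]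
  rw [List.foldl_cons, List.foldl_append]
  have h0 : PySem.Set.add [] c = [c] := by simp [PySem.Set.add, PySem.Set.contains]
  rw [h0, ofList_all_eq t c ht]
  have := update_append r [c] [] (fun y hy => by
    simp only [List.mem_singleton]
    exact fun hyc => hr (hyc ▸ hy))
  simpa using this

theorem dropWhile_head_false {α : Type} {p : α → Bool} : ∀ (l : List α) (hd : α) (tl : List α),
    List.dropWhile p l = hd :: tl → p hd = false := by
  intro l
  induction l with
  | nil => intro hd tl h; simp [List.dropWhile] at h
  | cons a l' ih =>
    intro hd tl h
    by_cases hp : p a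
    · rw [List.dropWhile_cons_of_pos hp] at h; exact ih _ _ h
    · rw [List.dropWhile_cons_of_neg hp] at h
      cases h; simpa using hp

theorem runScan_eq_aux (n : Int) (k : Nat) : ∀ l : List Char, l.length ≤ k →
    l.Pairwise (· ≤ ·) → runScan n l = (distinctWithCount l n : Int) := by
  induction k with
  | zero =>
    intro l hl _
    have : l = [] := by cases l <;> simp_all
    subst this
    simp [runScan, distinctWithCount, PySem.List.dedup_eq_ofList, PySem.Set.ofList]
  | succ k ih =>
    intro l hl h
    match l with
    | [] => simp [runScan, distinctWithCount, PySem.List.dedup_eq_ofList, PySem.Set.ofList]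
    | c :: rest =>
      have hrest_pw : rest.Pairwise (· ≤ ·) := (List.pairwise_cons.mp h).2
      have hcle : ∀ x ∈ rest, c ≤ x := (List.pairwise_cons.mp h).1
      set t := rest.takeWhile (fun x => x == c) with htdef
      set r := rest.dropWhile (fun x => x == c) with hrdef
      have htr : t ++ r = rest := List.takeWhile_append_dropWhile
      have ht : ∀ x ∈ t, x = c := fun x hx => by
        have := List.mem_takeWhile_imp hx
        simpa using this
      have hrsub : r.Sublist rest := List.dropWhile_sublist _
      have hr_pw : r.Pairwise (· ≤ ·) := List.Pairwise.sublist hrsub hrest_pw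
      have hcr : c ∉ r := by
        cases hrc : r with
        | nil => simp
        | cons hd tl =>
          have hhd : (hd == c) = false := dropWhile_head_false rest hd tl (hrdef ▸ hrc)
          have hhdne : hd ≠ c := by simpa using hhd
          intro hc
          rcases List.mem_cons.mp hc with h1 | h2
          · exact hhdne h1.symm
          · have h3 : hd ≤ c := List.rel_of_pairwise_cons (hrc ▸ hr_pw) h2
            have h4 : c ≤ hd := hcle hd (hrsub.mem (by rw [hrc]; simp))
            exact hhdne (le_antisymm h3 h4)
      have hcount_t : t.count c = t.length := List.count_eq_length.mpr (fun b hb => (ht b hb).symm)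
      have hcount_r : r.count c = 0 := List.count_eq_zero.mpr hcr
      have hcount_c : (c :: rest).count c = 1 + t.length := by
        rw [List.count_cons_self, ← htr, List.count_append, hcount_t, hcount_r]
        omega
      have hdedup : PySem.List.dedup (c :: rest) = c :: PySem.List.dedup r := by
        rw [← htr]; exact dedup_run t r c ht hcr
      have hcount_x : ∀ x ∈ PySem.List.dedup r, (c :: rest).count x = r.count x := by
        intro x hx
        have hxr : x ∈ r := (PySem.List.mem_dedup r x).mp hx
        have hxc : x ≠ c := fun hxc => hcr (hxc ▸ hxr)
        have hxt : x ∉ t := fun hxt => hxc (ht x hxt)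
        rw [List.count_cons, ← htr, List.count_append,
            List.count_eq_zero.mpr hxt]
        simp [Ne.symm hxc]
      have ih' := ih r (by
        have := hrsub.length_le
        simp at hl
        omega) hr_pw
      have hscan : runScan n (c :: rest) =
          (if ((1 + t.length : Nat) : Int) == n then 1 else 0) + runScan n r := by
        rw [runScan]
      rw [hscan, ih']
      unfold distinctWithCount
      rw [hdedup, List.countP_cons]
      have hpc : (fun x => ((((c :: rest).count x : Int)) == n)) c = (((1 + t.length : Nat) : Int) == n) := by
        simp only [hcount_c]
      have hcongr : (PySem.List.dedup r).countP (fun x => (((c :: rest).count x : Int) == n))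
          = (PySem.List.dedup r).countP (fun x => ((r.count x : Int) == n)) :=
        List.countP_congr (fun x hx => by rw [hcount_x x hx])
      rw [hcongr]
      simp only [hpc]
      by_cases hn : ((1 + t.length : Nat) : Int) = n
      · simp [hn]
        ring
      · simp
        ring

theorem distinctWithCount_perm (l l' : List Char) (h : l.Perm l') (n : Int) :
    distinctWithCount l n = distinctWithCount l' n := by
  unfold distinctWithCount
  have hc : ∀ x, l.count x = l'.count x := h.count_eq
  have hp : (PySem.List.dedup l).Perm (PySem.List.dedup l') :=
    (List.perm_ext_iff_of_nodup (PySem.List.nodup_dedup l) (PySem.List.nodup_dedup l')).mpr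
      (fun a => by rw [PySem.List.mem_dedup, PySem.List.mem_dedup]; exact h.mem_iff)
  rw [hp.countP_eq]
  exact List.countP_congr (fun x _ => by rw [hc x])

-- ===== VERDICT (by name: the statement is the Claim_ definition above) =====
theorem everyoneAnswered_spec : Claim_equal_everyoneAnswered := by
  intro map2 _
  unfold Spec_everyoneAnswered everyoneAnswered everyoneAnswered_alt
  congr 1
  funext ans ques
  by_cases h1 : ques.length == 1
  · simp only [h1, if_true]
  · simp only [h1, Bool.false_eq_true, if_false]
    rw [aDict_eq_counter, PySem.Dict.items_counter, count_loop_eq, List.countP_map]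
    have hpw : (PySem.List.sorted ((ques.map String.toList).flatten) (fun x => x) false).Pairwise (· ≤ ·) :=
      PySem.List.sorted_pairwise _ _
    rw [runScan_eq_aux (ques.length : Int) _ _ le_rfl hpw]
    rw [distinctWithCount_perm _ ((ques.map String.toList).flatten)
      (PySem.List.sorted_perm _ _ false) _]
    unfold distinctWithCount
    rw [PySem.List.dedup_eq_ofList]
    rfl
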